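-- pv_equiv track=rewrite | github.com/pfif/dotfiles | scripts/vocabulary_weekly.py | sort_words_according_to_priority
-- ===== SOURCE A (Python) =====
-- PRIORITIES = {"i": 5, "p": 4, "n": 3, "o": 2, "b": 1}
--
-- def sort_words_according_to_priority(words):
--     highest_priority = max(PRIORITIES.values())
--     words_sorted = []
--     for priority in range(highest_priority, 0, -1):
--         words_sorted.extend(
--             [word for word in words if word["priority"] == priority]
--         )
--     return words_sorted
-- ===== SOURCE B (Python) =====
-- def sort_words_according_to_priority(words):
--     buckets = {}
--     for word in words:
--         buckets.setdefault(word["priority"], []).append(word)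
--     result = []
--     for priority in range(5, 0, -1):
--         result.extend(buckets.get(priority, []))
--     return result
-- ===== Notes on version B (the rewrite author's own statement) =====
-- stated objective: alternative
-- what changed: Single bucketing pass into a dict keyed by priority, then concatenate buckets for priorities 5..1, instead of re-scanning the whole word list once per priority level.
import Mathlib
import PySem

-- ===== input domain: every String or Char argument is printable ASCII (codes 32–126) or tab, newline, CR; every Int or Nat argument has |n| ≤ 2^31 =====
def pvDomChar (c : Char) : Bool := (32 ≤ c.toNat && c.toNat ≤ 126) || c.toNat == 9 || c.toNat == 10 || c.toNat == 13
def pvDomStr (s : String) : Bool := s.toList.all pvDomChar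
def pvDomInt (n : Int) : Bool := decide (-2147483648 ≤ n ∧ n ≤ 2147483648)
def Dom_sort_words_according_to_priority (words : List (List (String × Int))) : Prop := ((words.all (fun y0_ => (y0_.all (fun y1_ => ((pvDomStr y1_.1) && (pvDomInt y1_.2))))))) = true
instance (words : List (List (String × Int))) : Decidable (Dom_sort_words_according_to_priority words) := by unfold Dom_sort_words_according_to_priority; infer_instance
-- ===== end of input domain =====

-- B replaces A's five full scans (one per priority level) with a single bucketing pass; equal output on Pre_ (every word has a "priority" key).

-- word["priority"]: first-match lookup in the word's association list (Python dict access; KeyError = none, excluded by Pre_)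
def pvLookup (w : List (String × Int)) : Option Int :=
  (w.find? (fun p => p.1 == "priority")).map (·.2)

-- ===== PORT A =====
def PRIORITIES : PySem.Dict String Int :=
  PySem.Dict.ofList [("i", 5), ("p", 4), ("n", 3), ("o", 2), ("b", 1)]

def sort_words_according_to_priority (words : List (List (String × Int))) : List (List (String × Int)) :=
  let highest_priority : Int := (PySem.List.max? PRIORITIES.values (fun x => x)).getD 0  -- max of a nonempty literal, never the default
  (PySem.List.pyRange highest_priority 0 (-1)).foldl
    (fun words_sorted priority =>
      words_sorted ++ words.filter (fun word => pvLookup word == some priority)) []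

-- ===== PORT B =====
def sort_words_according_to_priority_alt (words : List (List (String × Int))) : List (List (String × Int)) :=
  let buckets := words.foldl
    (fun d word => d.modify (pvLookup word) [] (· ++ [word])) PySem.Dict.empty
  (PySem.List.pyRange 5 0 (-1)).foldl
    (fun result priority => result ++ buckets.getD (some priority) []) []

-- ===== PRECONDITION & SPEC =====
-- Pre_: every word carries a "priority" key; on a word without it the Python A raises KeyError.
def Pre_sort_words_according_to_priority (words : List (List (String × Int))) : Prop :=
  ∀ w ∈ words, "priority" ∈ w.map (·.1)
instance (words : List (List (String × Int))) : Decidable (Pre_sort_words_according_to_priority words) := by unfold Pre_sort_words_according_to_priority; infer_instance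

def pvWitness_sort_words_according_to_priority : (List (List (String × Int))) :=
  [[("priority", 2), ("id", 7)], [("priority", 5)], [("priority", 2)]]

def Spec_sort_words_according_to_priority (words : List (List (String × Int))) (out : List (List (String × Int))) : Prop := out = sort_words_according_to_priority_alt words
instance (words : List (List (String × Int))) (out : List (List (String × Int))) : Decidable (Spec_sort_words_according_to_priority words out) := by unfold Spec_sort_words_according_to_priority; infer_instance

-- ===== CLAIM (what is proved, stated in full; the proofs are below) =====
def Claim_equal_sort_words_according_to_priority : Prop := ∀ (words : List (List (String × Int))), Dom_sort_words_according_to_priority words → Pre_sort_words_according_to_priority words → Spec_sort_words_according_to_priority words (sort_words_according_to_priority words)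

-- ===== LEMMAS AND PROOFS =====

-- the bucketing loop groups: the bucket at key k is exactly the filter of the words whose lookup is k
theorem pvBucket_getD (l : List (List (String × Int)))
    (d : PySem.Dict (Option Int) (List (List (String × Int)))) (k : Option Int) :
    (l.foldl (fun d w => d.modify (pvLookup w) [] (· ++ [w])) d).getD k []
      = d.getD k [] ++ l.filter (fun w => pvLookup w == k) := by
  induction l generalizing d with
  | nil => simp
  | cons w l ih =>
    simp only [List.foldl_cons, ih, List.filter_cons]
    rw [PySem.Dict.getD_modify]
    by_cases h : k = pvLookup w
    · simp [h, List.append_assoc]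
    · have : (pvLookup w == k) = false := by
        simp; exact fun e => h e.symm
      simp [h, this]

-- ===== VERDICT (by name: the statement is the Claim_ definition above) =====
theorem sort_words_according_to_priority_spec : Claim_equal_sort_words_according_to_priority := by
  intro words _ _
  unfold Spec_sort_words_according_to_priority
  unfold sort_words_according_to_priority sort_words_according_to_priority_alt
  have hr : PySem.List.pyRange ((PySem.List.max? PRIORITIES.values (fun x => x)).getD 0) 0 (-1)
      = PySem.List.pyRange 5 0 (-1) := by decide
  simp only []
  rw [hr]
  apply PySem.List.foldl_congr_mem
  intro acc p _
  rw [pvBucket_getD]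
  simp
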